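-- pv_equiv track=rewrite | github.com/lfforai/zd_project | .idea/spark-warehouse/spark-streaming/model_run_AR.py | fuc_2
-- ===== SOURCE A (Python) =====
-- def fuc_2(iterator):
--     value_list=[]
--     for a in iterator:
--         for j in range(str(a).__len__()):
--             len=str(a).__len__()
--             if j>0 and j<len-3:
--                 if  a[j].isdigit() and (a[j+1].__eq__("F") or a[j+1].__eq__("N")) \
--                         and  (a[j+2].__eq__("W") or a[j+2].__eq__("Q") or a[j+2].__eq__("S")):
--                     index2=str(a).find("_",2)
--                     value_list.append([a[0:index2],a[j+2],a[0:j+1],str(a)])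
--     return value_list
--
-- j=0
-- ===== SOURCE B (Python) =====
-- def fuc_2(iterator):
--     out = []
--     for a in iterator:
--         s = str(a)
--         n = len(s)
--         # three independent index sets, one per pattern position
--         digits = {i for i, c in enumerate(s) if c.isdigit()}
--         fns = {i - 1 for i, c in enumerate(s) if c in 'FN'}
--         wqs = {i - 2 for i, c in enumerate(s) if c in 'WQS'}
--         pre = s[:s.find('_', 2)]
--         for j in sorted(digits & fns & wqs):
--             if 0 < j < n - 3:
--                 out.append([pre, s[j + 2], s[:j + 1], s])
--     return out
-- ===== Notes on version B (the rewrite author's own statement) =====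
-- stated objective: alternative
-- what changed: A's single index scan testing three characters at each position is replaced by three independent per-position passes that build index sets (digit positions, 'FN' positions shifted by 1, 'WQS' positions shifted by 2), intersected as sets and iterated in sorted order, with the length and the '_'-prefix computed once per string.
import Mathlib
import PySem

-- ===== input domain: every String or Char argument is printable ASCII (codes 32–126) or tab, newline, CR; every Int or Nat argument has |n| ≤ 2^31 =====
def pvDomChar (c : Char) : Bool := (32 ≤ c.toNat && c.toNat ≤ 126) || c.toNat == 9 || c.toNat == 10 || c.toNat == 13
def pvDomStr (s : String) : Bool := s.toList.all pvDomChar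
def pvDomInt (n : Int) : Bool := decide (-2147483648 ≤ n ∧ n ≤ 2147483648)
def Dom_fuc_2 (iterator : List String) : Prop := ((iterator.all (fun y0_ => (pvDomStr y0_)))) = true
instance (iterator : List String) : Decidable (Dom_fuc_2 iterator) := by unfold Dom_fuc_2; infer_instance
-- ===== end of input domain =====

-- B replaces A's single index scan (three character tests at each position, length recomputed each
-- iteration, find re-run per match) by three independent per-position passes building shifted index
-- sets, intersected and iterated in sorted order (objective: alternative).

-- ===== PORT A =====
-- inner loop of A: for j in range(len(a)) over one string a
def fuc_2_inner (a : String) (acc : List (List String)) : List (List String) :=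
  (PySem.List.pyRange 0 (PySem.Str.len a)).foldl (fun vl j =>
    let len : Int := PySem.Str.len a
    if j > 0 ∧ j < len - 3 then
      match PySem.Str.pyGet? a j, PySem.Str.pyGet? a (j+1), PySem.Str.pyGet? a (j+2) with
      | some c1, some c2, some c3 =>
        if PySem.Chars.isdigit c1 && (c2 == 'F' || c2 == 'N')
            && (c3 == 'W' || c3 == 'Q' || c3 == 'S') then
          let index2 := PySem.Str.findFrom a "_" 2
          vl ++ [[PySem.Str.slice a (some 0) (some index2), String.ofList [c3],
                  PySem.Str.slice a (some 0) (some (j+1)), a]]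
        else vl
      | _, _, _ => vl
    else vl) acc

def fuc_2 (iterator : List String) : List (List String) :=
  iterator.foldl (fun vl a => fuc_2_inner a vl) []

-- ===== PORT B =====
-- B's three index-set comprehensions and its hoisted locals, as helpers
def pvDigits (cs : List Char) : PySem.Set Int := PySem.Set.ofList
  ((PySem.List.enumerate cs).filterMap (fun p => if PySem.Chars.isdigit p.2 then some p.1 else none))

def pvFns (cs : List Char) : PySem.Set Int := PySem.Set.ofList
  ((PySem.List.enumerate cs).filterMap (fun p => if p.2 = 'F' ∨ p.2 = 'N' then some (p.1 - 1) else none))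

def pvWqs (cs : List Char) : PySem.Set Int := PySem.Set.ofList
  ((PySem.List.enumerate cs).filterMap (fun p => if p.2 = 'W' ∨ p.2 = 'Q' ∨ p.2 = 'S' then some (p.1 - 2) else none))

def pvPre (s : String) : String := PySem.Str.slice s none (some (PySem.Str.findFrom s "_" 2))

-- one string's contribution in B: set intersection, then the sorted match loop
def fuc_2_alt_inner (s : String) (out : List (List String)) : List (List String) :=
  (PySem.List.sorted
      (PySem.Set.inter (PySem.Set.inter (pvDigits s.toList) (pvFns s.toList)) (pvWqs s.toList))
      (fun x => x) false).foldl
    (fun out j =>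
      if 0 < j ∧ j < (s.toList.length : Int) - 3 then
        -- s[j+2]: in range whenever the guard holds; '.getD' is only a totality device
        out ++ [[pvPre s, String.ofList [(PySem.Str.pyGet? s (j + 2)).getD ' '],
                 PySem.Str.slice s none (some (j + 1)), s]]
      else out) out

def fuc_2_alt (iterator : List String) : List (List String) :=
  iterator.foldl (fun out a => fuc_2_alt_inner a out) []

-- ===== PRECONDITION & SPEC =====
def Spec_fuc_2 (iterator : List String) (out : List (List String)) : Prop := out = fuc_2_alt iterator
instance (iterator : List String) (out : List (List String)) : Decidable (Spec_fuc_2 iterator out) := by unfold Spec_fuc_2; infer_instance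

-- ===== CLAIM (what is proved, stated in full; the proofs are below) =====
def Claim_equal_fuc_2 : Prop := ∀ (iterator : List String), Dom_fuc_2 iterator → Spec_fuc_2 iterator (fuc_2 iterator)

-- ===== LEMMAS AND PROOFS =====
-- canonical per-string condition and entry
abbrev pvCond (cs : List Char) (k : Nat) : Prop :=
  0 < k ∧ k + 3 < cs.length ∧ PySem.Chars.isdigit (cs.getD k ' ') = true ∧
  (cs.getD (k+1) ' ' = 'F' ∨ cs.getD (k+1) ' ' = 'N') ∧
  (cs.getD (k+2) ' ' = 'W' ∨ cs.getD (k+2) ' ' = 'Q' ∨ cs.getD (k+2) ' ' = 'S')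

abbrev pvCond3 (cs : List Char) (k : Nat) : Prop :=
  PySem.Chars.isdigit (cs.getD k ' ') = true ∧
  (k + 1 < cs.length ∧ (cs.getD (k+1) ' ' = 'F' ∨ cs.getD (k+1) ' ' = 'N')) ∧
  (k + 2 < cs.length ∧ (cs.getD (k+2) ' ' = 'W' ∨ cs.getD (k+2) ' ' = 'Q' ∨ cs.getD (k+2) ' ' = 'S'))

def pvEnt (a : String) (k : Nat) : List String :=
  [PySem.Str.slice a none (some (PySem.Str.findFrom a "_" 2)),
   String.ofList [a.toList.getD (k+2) ' '],
   PySem.Str.slice a none (some ((k : Int) + 1)), a]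

def pvCanon (a : String) : List (List String) :=
  ((List.range a.toList.length).filter (fun k => decide (pvCond a.toList k))).map (pvEnt a)

theorem pvA (a : String) (acc : List (List String)) :
    fuc_2_inner a acc = acc ++ pvCanon a := by
  unfold fuc_2_inner pvCanon
  rw [PySem.Str.len_eq, PySem.List.pyRange_zero_natCast, List.foldl_map]
  rw [PySem.List.foldl_congr_mem _ _
      (fun vl k => if pvCond a.toList k then vl ++ [pvEnt a k] else vl) acc ?_]
  · exact PySem.List.foldl_append_ite (pvCond a.toList) (pvEnt a) _ _
  · intro vl k hk
    have hkn : k < a.toList.length := List.mem_range.mp hk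
    by_cases hP : pvCond a.toList k
    · obtain ⟨h0, h3, hd, h2, hw⟩ := hP
      have hg : ((k : Int) > 0 ∧ (k : Int) < (a.toList.length : Int) - 3) := by
        constructor <;> [exact_mod_cast h0; (push_cast; omega)]
      simp only [if_pos hg]
      have e0 : PySem.Str.pyGet? a (k : Int) = some (a.toList.getD k ' ') := by
        rw [PySem.Str.pyGet?_natCast, List.getElem?_eq_getElem (by omega),
            List.getD_eq_getElem _ _ (by omega)]
      have e1 : PySem.Str.pyGet? a ((k : Int) + 1) = some (a.toList.getD (k+1) ' ') := by
        rw [show ((k : Int) + 1) = ((k+1 : Nat) : Int) by push_cast; ring,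
            PySem.Str.pyGet?_natCast, List.getElem?_eq_getElem (by omega),
            List.getD_eq_getElem _ _ (by omega)]
      have e2 : PySem.Str.pyGet? a ((k : Int) + 2) = some (a.toList.getD (k+2) ' ') := by
        rw [show ((k : Int) + 2) = ((k+2 : Nat) : Int) by push_cast; ring,
            PySem.Str.pyGet?_natCast, List.getElem?_eq_getElem (by omega),
            List.getD_eq_getElem _ _ (by omega)]
      rw [e0, e1, e2]
      simp only []
      have hb : (PySem.Chars.isdigit (a.toList.getD k ' ')
          && (a.toList.getD (k+1) ' ' == 'F' || a.toList.getD (k+1) ' ' == 'N')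
          && (a.toList.getD (k+2) ' ' == 'W' || a.toList.getD (k+2) ' ' == 'Q'
              || a.toList.getD (k+2) ' ' == 'S')) = true := by
        simp only [Bool.and_eq_true, Bool.or_eq_true, beq_iff_eq]
        exact ⟨⟨hd, by tauto⟩, by tauto⟩
      rw [if_pos hb]
      simp only [if_pos (show pvCond a.toList k from ⟨h0, h3, hd, h2, hw⟩)]
      unfold pvEnt
      simp [PySem.Str.slice]
    · have hrhs : (fun vl k => if pvCond a.toList k then vl ++ [pvEnt a k] else vl) vl k = vl := by
        simp only [if_neg hP]
      rw [hrhs]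
      by_cases hg : ((k : Int) > 0 ∧ (k : Int) < (a.toList.length : Int) - 3)
      · have h0 : 0 < k := by exact_mod_cast hg.1
        have h3 : k + 3 < a.toList.length := by
          have := hg.2; push_cast at this; omega
        have e0 : PySem.Str.pyGet? a (k : Int) = some (a.toList.getD k ' ') := by
          rw [PySem.Str.pyGet?_natCast, List.getElem?_eq_getElem (by omega),
              List.getD_eq_getElem _ _ (by omega)]
        have e1 : PySem.Str.pyGet? a ((k : Int) + 1) = some (a.toList.getD (k+1) ' ') := by
          rw [show ((k : Int) + 1) = ((k+1 : Nat) : Int) by push_cast; ring,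
              PySem.Str.pyGet?_natCast, List.getElem?_eq_getElem (by omega),
              List.getD_eq_getElem _ _ (by omega)]
        have e2 : PySem.Str.pyGet? a ((k : Int) + 2) = some (a.toList.getD (k+2) ' ') := by
          rw [show ((k : Int) + 2) = ((k+2 : Nat) : Int) by push_cast; ring,
              PySem.Str.pyGet?_natCast, List.getElem?_eq_getElem (by omega),
              List.getD_eq_getElem _ _ (by omega)]
        rw [if_pos hg, e0, e1, e2]
        simp only []
        have hb : (PySem.Chars.isdigit (a.toList.getD k ' ')
            && (a.toList.getD (k+1) ' ' == 'F' || a.toList.getD (k+1) ' ' == 'N')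
            && (a.toList.getD (k+2) ' ' == 'W' || a.toList.getD (k+2) ' ' == 'Q'
                || a.toList.getD (k+2) ' ' == 'S')) = false := by
          rw [Bool.eq_false_iff]
          intro hc
          simp only [Bool.and_eq_true, Bool.or_eq_true, beq_iff_eq] at hc
          exact hP ⟨h0, h3, hc.1.1, hc.1.2, by tauto⟩
        rw [if_neg (by rw [hb]; exact Bool.false_ne_true)]
      · rw [if_neg hg]

theorem pv_filterMap_if {α β : Type} (p : α → Prop) [DecidablePred p] (f : α → β) (l : List α) :
    l.filterMap (fun x => if p x then some (f x) else none)
      = (l.filter (fun x => decide (p x))).map f := by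
  induction l with
  | nil => rfl
  | cons x t ih =>
    by_cases hx : p x <;> simp [hx, ih]

-- one index-set pass of B, as a filtered range
theorem pv_pass (cs : List Char) (P : Char → Prop) [DecidablePred P] (g : Int → Int) :
    (PySem.List.enumerate cs).filterMap (fun p => if P p.2 then some (g p.1) else none)
      = (((List.range cs.length).filter (fun k => decide (P (cs.getD k ' ')))).map
          (fun k : Nat => g (k : Int))) := by
  rw [PySem.List.enumerate_eq_map_pyRange cs ' ',
      show PySem.List.len cs = ((cs.length : Nat) : Int) from rfl,
      PySem.List.pyRange_zero_natCast, List.map_map, List.filterMap_map]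
  refine (List.filterMap_congr ?_).trans
    (pv_filterMap_if (fun k : Nat => P (cs.getD k ' ')) (fun k : Nat => g (k : Int)) _)
  intro k hk
  have hk' : k < cs.length := List.mem_range.mp hk
  simp only [Function.comp, PySem.List.pyGetD_natCast]

-- the three index-set lists and the matching index list, named so goals stay small
def pvDl (cs : List Char) : List Int :=
  ((List.range cs.length).filter
      (fun k => decide (PySem.Chars.isdigit (cs.getD k ' ') = true))).map (fun k : Nat => ((k : Int)))

def pvFl (cs : List Char) : List Int :=
  ((List.range cs.length).filter
      (fun k => decide (cs.getD k ' ' = 'F' ∨ cs.getD k ' ' = 'N'))).map (fun k : Nat => ((k : Int) - 1))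

def pvWl (cs : List Char) : List Int :=
  ((List.range cs.length).filter
      (fun k => decide (cs.getD k ' ' = 'W' ∨ cs.getD k ' ' = 'Q' ∨ cs.getD k ' ' = 'S'))).map
    (fun k : Nat => ((k : Int) - 2))

def pvIdx (cs : List Char) : List Nat :=
  (List.range cs.length).filter (fun k => decide (pvCond3 cs k))

theorem pvDl_eq (cs : List Char) :
    (PySem.List.enumerate cs).filterMap
        (fun p => if PySem.Chars.isdigit p.2 then some p.1 else none) = pvDl cs := by
  unfold pvDl
  simpa using pv_pass cs (fun c => PySem.Chars.isdigit c = true) (fun i => i)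

theorem pvFl_eq (cs : List Char) :
    (PySem.List.enumerate cs).filterMap
        (fun p => if p.2 = 'F' ∨ p.2 = 'N' then some (p.1 - 1) else none) = pvFl cs := by
  unfold pvFl
  simpa using pv_pass cs (fun c => c = 'F' ∨ c = 'N') (fun i => i - 1)

theorem pvWl_eq (cs : List Char) :
    (PySem.List.enumerate cs).filterMap
        (fun p => if p.2 = 'W' ∨ p.2 = 'Q' ∨ p.2 = 'S' then some (p.1 - 2) else none) = pvWl cs := by
  unfold pvWl
  simpa using pv_pass cs (fun c => c = 'W' ∨ c = 'Q' ∨ c = 'S') (fun i => i - 2)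

theorem pvFl_mem (cs : List Char) (k : Nat) : ((k : Int) ∈ pvFl cs) ↔
    (k + 1 < cs.length ∧ (cs.getD (k+1) ' ' = 'F' ∨ cs.getD (k+1) ' ' = 'N')) := by
  unfold pvFl
  simp only [List.mem_map, List.mem_filter, List.mem_range, decide_eq_true_eq]
  constructor
  · rintro ⟨i, ⟨hi, hp⟩, he⟩
    have : i = k + 1 := by omega
    subst this; exact ⟨by omega, hp⟩
  · rintro ⟨h1, h2⟩
    exact ⟨k + 1, ⟨by omega, h2⟩, by push_cast; ring⟩

theorem pvWl_mem (cs : List Char) (k : Nat) : ((k : Int) ∈ pvWl cs) ↔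
    (k + 2 < cs.length ∧ (cs.getD (k+2) ' ' = 'W' ∨ cs.getD (k+2) ' ' = 'Q' ∨ cs.getD (k+2) ' ' = 'S')) := by
  unfold pvWl
  simp only [List.mem_map, List.mem_filter, List.mem_range, decide_eq_true_eq]
  constructor
  · rintro ⟨i, ⟨hi, hp⟩, he⟩
    have : i = k + 2 := by omega
    subst this; exact ⟨by omega, hp⟩
  · rintro ⟨h1, h2⟩
    exact ⟨k + 2, ⟨by omega, h2⟩, by push_cast; ring⟩

theorem pvInter (cs : List Char) :
    PySem.Set.inter (PySem.Set.inter (PySem.Set.ofList (pvDl cs)) (PySem.Set.ofList (pvFl cs)))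
        (PySem.Set.ofList (pvWl cs))
      = (pvIdx cs).map (fun k : Nat => ((k : Int))) := by
  have hDn : (pvDl cs).Nodup := List.Nodup.map (fun x y h => by omega)
      ((List.nodup_range).filter _)
  have hFn : (pvFl cs).Nodup := List.Nodup.map (fun x y h => by omega)
      ((List.nodup_range).filter _)
  have hWn : (pvWl cs).Nodup := List.Nodup.map (fun x y h => by omega)
      ((List.nodup_range).filter _)
  rw [PySem.Set.ofList_eq_self_of_nodup _ hDn, PySem.Set.ofList_eq_self_of_nodup _ hFn,
      PySem.Set.ofList_eq_self_of_nodup _ hWn]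
  have hinter : ∀ s t : List Int, PySem.Set.inter s t = s.filter (fun x => PySem.Set.contains t x) :=
    fun _ _ => rfl
  rw [hinter, hinter]
  unfold pvDl pvIdx
  rw [List.filter_map, List.filter_map, List.filter_filter, List.filter_filter]
  refine congrArg (List.map _) (List.filter_congr ?_)
  intro k hk
  have hkn : k < cs.length := List.mem_range.mp hk
  rw [Bool.eq_iff_iff]
  simp only [Function.comp, Bool.and_eq_true, decide_eq_true_eq, PySem.Set.contains_iff]
  rw [pvFl_mem cs k, pvWl_mem cs k]
  unfold pvCond3
  tauto

theorem pvSorted (cs : List Char) :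
    PySem.List.sorted ((pvIdx cs).map (fun k : Nat => ((k : Int)))) (fun x => x) false
      = (pvIdx cs).map (fun k : Nat => ((k : Int))) := by
  have hp : (List.map (fun k : Nat => ((k : Int))) (pvIdx cs)).Pairwise (· < ·) := by
    refine List.Pairwise.map (R := (· < · : Nat → Nat → Prop)) _
      (fun x y h => by exact_mod_cast h) ?_
    exact List.Pairwise.sublist List.filter_sublist List.pairwise_lt_range
  exact PySem.List.sorted_eq_of_perm_of_pairwise_lt _ _ (fun x => x) (List.Perm.refl _)
    (by simpa using hp)

set_option maxHeartbeats 800000 in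
theorem pvLoop (a : String) (acc : List (List String)) :
    ((pvIdx a.toList).map (fun k : Nat => ((k : Int)))).foldl
      (fun out j =>
        if 0 < j ∧ j < (a.toList.length : Int) - 3 then
          out ++ [[pvPre a, String.ofList [(PySem.Str.pyGet? a (j + 2)).getD ' '],
                   PySem.Str.slice a none (some (j + 1)), a]]
        else out) acc
      = acc ++ pvCanon a := by
  rw [PySem.List.foldl_append_ite
      (fun j : Int => 0 < j ∧ j < (a.toList.length : Int) - 3)
      (fun j : Int => [pvPre a,
        String.ofList [(PySem.Str.pyGet? a (j + 2)).getD ' '],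
        PySem.Str.slice a none (some (j + 1)), a]) _ acc]
  congr 1
  rw [List.filter_map, List.map_map]
  unfold pvIdx pvCanon
  rw [List.filter_filter]
  refine Eq.trans (congrArg (List.map _)
      (List.filter_congr (q := fun k => decide (pvCond a.toList k)) ?_)) (List.map_congr_left ?_)
  · -- the matching indices inside the bounds are exactly pvCond
    intro k hk
    have hkn : k < a.toList.length := List.mem_range.mp hk
    rw [Bool.eq_iff_iff]
    simp only [Function.comp, Bool.and_eq_true, decide_eq_true_eq]
    unfold pvCond3 pvCond
    constructor
    · rintro ⟨⟨hg1, hg2⟩, hd, h2, h3⟩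
      exact ⟨by omega, by omega, hd, h2.2, h3.2⟩
    · rintro ⟨h0, h3n, hd, h2, h3⟩
      exact ⟨⟨by omega, by omega⟩, hd, ⟨by omega, h2⟩, by omega, h3⟩
  · -- the entries agree on matching indices
    intro k hk
    have hP : pvCond a.toList k := of_decide_eq_true (List.mem_filter.mp hk).2
    obtain ⟨h0, h3, -, -, -⟩ := hP
    simp only [Function.comp]
    unfold pvEnt pvPre
    have e2 : PySem.Str.pyGet? a ((k : Int) + 2) = some (a.toList.getD (k+2) ' ') := by
      rw [show ((k : Int) + 2) = ((k+2 : Nat) : Int) by push_cast; ring,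
          PySem.Str.pyGet?_natCast, List.getElem?_eq_getElem (by omega),
          List.getD_eq_getElem _ _ (by omega)]
    rw [e2]; rfl

theorem pvB (a : String) (acc : List (List String)) :
    fuc_2_alt_inner a acc = acc ++ pvCanon a := by
  unfold fuc_2_alt_inner pvDigits pvFns pvWqs
  rw [pvDl_eq, pvFl_eq, pvWl_eq, pvInter, pvSorted]
  exact pvLoop a acc

-- A's and B's outer loops both produce the concatenation of the canonical per-string lists
theorem pv_flatA (l : List String) :
    ∀ acc, l.foldl (fun vl a => fuc_2_inner a vl) acc = acc ++ l.flatMap pvCanon := by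
  induction l with
  | nil => simp
  | cons a t ih =>
    intro acc
    rw [List.foldl_cons, List.flatMap_cons, pvA, ih, List.append_assoc]

theorem pv_flatB (l : List String) :
    ∀ acc, l.foldl (fun out a => fuc_2_alt_inner a out) acc = acc ++ l.flatMap pvCanon := by
  induction l with
  | nil => simp
  | cons a t ih =>
    intro acc
    rw [List.foldl_cons, List.flatMap_cons, pvB, ih, List.append_assoc]

-- ===== VERDICT (by name: the statement is the Claim_ definition above) =====
theorem fuc_2_spec : Claim_equal_fuc_2 := by
  intro iterator _
  unfold Spec_fuc_2 fuc_2 fuc_2_alt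
  rw [pv_flatA, pv_flatB]
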